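-- pv_equiv track=rewrite | github.com/nitekat1124/advent-of-code-2021 | solutions/day17.py | get_possible_move_times
-- ===== SOURCE A (Python) =====
-- def get_possible_move_times(velocity_y, range_y):
--     times = 1
--     pos_y = 0
--     ret = []
--
--     while 1:
--         pos_y += velocity_y
--         if range_y[0] <= pos_y <= range_y[1]:
--             ret += [times]
--         if pos_y < range_y[0]:
--             break
--         velocity_y -= 1
--         times += 1
--     return ret
-- ===== SOURCE B (Python) =====
-- def _isqrt(n):
--     # floor integer square root by Newton's iteration (no floats)
--     if n == 0:
--         return 0
--     x = n
--     y = (x + 1) // 2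
--     while y < x:
--         x = y
--         y = (x + n // x) // 2
--     return x
--
--
-- def get_possible_move_times(velocity_y, range_y):
--     lo, hi = range_y[0], range_y[1]
--     # position after t steps is t*(2*velocity_y - t + 1) // 2, a downward parabola in t;
--     # the loop of A stops the first time it drops below lo, so if the very first
--     # position (= velocity_y) is already below lo nothing is ever recorded
--     if velocity_y < lo:
--         return []
--     b = 2 * velocity_y + 1
--     # T = last step with position >= lo (largest root of t^2 - b*t + 2*lo <= 0)
--     T = (b + _isqrt(b * b - 8 * lo)) // 2
--     d2 = b * b - 8 * hi
--     if d2 <= 0: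
--         # every step up to T has position <= hi
--         return list(range(1, T + 1))
--     # position <= hi iff (2t-b)^2 >= d2, i.e. t <= t1 or t >= t2
--     c2 = _isqrt(d2 - 1) + 1
--     t1 = (b - c2) // 2
--     t2 = (b + c2 + 1) // 2
--     return list(range(1, min(t1, T) + 1)) + list(range(max(t2, 1), T + 1))
-- ===== Notes on version B (the rewrite author's own statement) =====
-- stated objective: faster
-- what changed: A simulates the projectile step by step (one loop iteration per time step); B solves the two quadratic inequalities lo <= pos(t) <= hi in closed form with a Newton integer square root and emits the answer as one or two contiguous integer ranges.
-- outside the precondition, e.g. on get_possible_move_times(0, (5,)): A returns [], B raises IndexError; on get_possible_move_times(3, ()): A raises IndexError, B raises IndexError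
import Mathlib
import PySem

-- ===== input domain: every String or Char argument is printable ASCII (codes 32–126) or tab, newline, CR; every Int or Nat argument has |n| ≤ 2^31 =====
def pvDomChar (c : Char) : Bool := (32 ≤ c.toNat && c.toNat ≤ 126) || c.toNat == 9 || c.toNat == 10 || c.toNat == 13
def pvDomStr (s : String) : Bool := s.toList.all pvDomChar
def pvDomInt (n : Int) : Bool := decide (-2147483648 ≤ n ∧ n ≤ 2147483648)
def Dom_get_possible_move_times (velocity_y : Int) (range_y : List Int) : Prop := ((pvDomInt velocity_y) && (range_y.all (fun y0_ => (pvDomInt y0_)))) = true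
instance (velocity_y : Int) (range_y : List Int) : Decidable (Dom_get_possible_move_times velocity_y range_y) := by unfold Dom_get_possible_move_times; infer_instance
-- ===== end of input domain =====

-- B replaces A's step-by-step simulation of the projectile with a closed-form solution of the
-- two quadratic inequalities lo ≤ pos(t) ≤ hi (integer square roots by Newton's iteration),
-- emitting the answer as one or two contiguous integer ranges (objective: faster; it skips the per-step loop).

-- ===== PORT A =====
-- the while-loop of A: pos_y += velocity_y; record; break when pos_y < lo; velocity_y -= 1; times += 1
def goA (lo hi v pos t : Int) (ret : List Int) : List Int :=
  let pos' := pos + v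
  let ret' := if lo ≤ pos' ∧ pos' ≤ hi then ret ++ [t] else ret
  if pos' < lo then ret'
  else goA lo hi (v - 1) pos' (t + 1) ret'
termination_by ((2 * (pos + v) + (if 0 ≤ v - 1 then (v - 1) * v else 0) - 2 * lo + 2).toNat, (v + 1).toNat)
decreasing_by
  have hc : lo ≤ pos + v := by omega
  rcases lt_trichotomy v 1 with hv | hv | hv
  · rcases eq_or_lt_of_le (show v ≤ 0 by omega) with h0 | h0
    · apply Prod.Lex.right' <;> simp [← h0] <;> omega
    · apply Prod.Lex.left
      have h1 : ¬ (0 ≤ v - 1) := by omega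
      have h2 : ¬ (0 ≤ v - 1 - 1) := by omega
      simp only [h1, h2, if_false]
      omega
  · subst hv
    apply Prod.Lex.right' <;> norm_num <;> omega
  · apply Prod.Lex.right'
    · have h1 : (0 ≤ v - 1) := by omega
      have h2 : (0 ≤ v - 1 - 1) := by omega
      simp only [h1, h2, if_true]
      have : (v - 1 - 1) * (v - 1) = (v - 1) * v - 2 * (v - 1) := by ring
      omega
    · omega

def get_possible_move_times (velocity_y : Int) (range_y : List Int) : List Int :=
  match PySem.List.pyGet? range_y 0, PySem.List.pyGet? range_y 1 with
  | some lo, some hi => goA lo hi velocity_y 0 1 []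
  | _, _ => []  -- IndexError in Python (fewer than two bounds); excluded by Pre_

-- ===== PORT B =====
-- Newton's-iteration integer square root of Source B (the loop runs on nonnegative values only,
-- where Nat arithmetic is exact for Python's //)
def isqrtLoop (n x y : Nat) : Nat :=
  if h : y < x then isqrtLoop n y ((y + n / y) / 2) else x
termination_by x

def isqrtB (n : Int) : Int :=
  if n == 0 then 0 else (isqrtLoop n.toNat n.toNat ((n.toNat + 1) / 2) : Int)

def get_possible_move_times_alt (velocity_y : Int) (range_y : List Int) : List Int :=
  match PySem.List.pyGet? range_y 0 with
  | none => []  -- IndexError in Python; excluded by Pre_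
  | some lo =>
  match PySem.List.pyGet? range_y 1 with
  | none => []  -- IndexError in Python; excluded by Pre_
  | some hi =>
    if velocity_y < lo then []
    else
      let b := 2 * velocity_y + 1
      let T := PySem.Int.floordiv (b + isqrtB (b * b - 8 * lo)) 2
      let d2 := b * b - 8 * hi
      if d2 ≤ 0 then PySem.List.pyRange 1 (T + 1) 1
      else
        let c2 := isqrtB (d2 - 1) + 1
        let t1 := PySem.Int.floordiv (b - c2) 2
        let t2 := PySem.Int.floordiv (b + c2 + 1) 2
        PySem.List.pyRange 1 (min t1 T + 1) 1 ++ PySem.List.pyRange (max t2 1) (T + 1) 1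

-- ===== PRECONDITION & SPEC =====
-- Pre_ excludes range lists with fewer than two elements, on which A raises IndexError
-- (except that short-circuit evaluation lets a one-element list return [] when the first
-- position is already below its bound — there B raises, so those inputs stay outside).
def Pre_get_possible_move_times (velocity_y : Int) (range_y : List Int) : Prop :=
  2 ≤ range_y.length
instance (velocity_y : Int) (range_y : List Int) : Decidable (Pre_get_possible_move_times velocity_y range_y) := by unfold Pre_get_possible_move_times; infer_instance

def pvWitness_get_possible_move_times : Int × List Int := (3, [-5, -1])

def Spec_get_possible_move_times (velocity_y : Int) (range_y : List Int) (out : List Int) : Prop := out = get_possible_move_times_alt velocity_y range_y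
instance (velocity_y : Int) (range_y : List Int) (out : List Int) : Decidable (Spec_get_possible_move_times velocity_y range_y out) := by unfold Spec_get_possible_move_times; infer_instance

-- ===== CLAIM (what is proved, stated in full; the proofs are below) =====
def Claim_equal_get_possible_move_times : Prop := ∀ (velocity_y : Int) (range_y : List Int), Dom_get_possible_move_times velocity_y range_y → Pre_get_possible_move_times velocity_y range_y → Spec_get_possible_move_times velocity_y range_y (get_possible_move_times velocity_y range_y)

-- ===== LEMMAS AND PROOFS =====

-- Newton's iteration computes Nat.sqrt
lemma sqrt_le_avg (n y : Nat) (hn : 1 ≤ n) (hy : 1 ≤ y) : Nat.sqrt n ≤ (y + n / y) / 2 := by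
  set s := Nat.sqrt n with hs
  rw [Nat.le_div_iff_mul_le (by norm_num)]
  by_contra hlt
  push_neg at hlt
  have hq := Nat.div_add_mod n y
  have hr : n % y < y := Nat.mod_lt _ (by omega)
  have hsq : s * s ≤ n := by have h := Nat.sqrt_le' n; simpa [pow_two] using h
  -- cast to Int and contradict
  have hlt' : y + n / y < 2 * s := by omega
  have h1 : (y : Int) + ((n / y : Nat) : Int) < 2 * (s : Int) := by exact_mod_cast hlt'
  have h2 : (n : Int) = (y : Int) * ((n / y : Nat) : Int) + ((n % y : Nat) : Int) := by exact_mod_cast hq.symm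
  have h3 : ((n % y : Nat) : Int) < (y : Int) := by exact_mod_cast hr
  have h4 : ((s : Int)) * s ≤ (n : Int) := by exact_mod_cast hsq
  nlinarith [sq_nonneg ((y : Int) - (s : Int))]

lemma isqrtLoop_eq (n : Nat) (hn : 1 ≤ n) :
    ∀ x y : Nat, Nat.sqrt n ≤ x → Nat.sqrt n ≤ y → (x ≤ y → x * x ≤ n) → isqrtLoop n x y = Nat.sqrt n := by
  intro x
  induction x using Nat.strong_induction_on with
  | _ x ih =>
    intro y hx hy hxy
    have hs1 : 1 ≤ Nat.sqrt n := Nat.le_sqrt.mpr (by omega)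
    rw [isqrtLoop]
    split
    · next h =>
      refine ih y h ((y + n / y) / 2) hy (sqrt_le_avg n y hn (by omega)) ?_
      intro hle
      have : 2 * y ≤ y + n / y := by
        have := (Nat.le_div_iff_mul_le (k := 2) (by norm_num)).mp hle
        omega
      have hyd : y ≤ n / y := by omega
      have := (Nat.le_div_iff_mul_le (k := y) (by omega)).mp hyd
      omega
    · next h =>
      have h1 : x * x ≤ n := hxy (by omega)
      have h2 : x ≤ Nat.sqrt n := Nat.le_sqrt.mpr (by nlinarith)
      omega

lemma isqrtB_eq (n : Int) (hn : 0 ≤ n) : isqrtB n = (Nat.sqrt n.toNat : Int) := by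
  unfold isqrtB
  rcases eq_or_lt_of_le hn with h0 | h0
  · simp [← h0]
  · have hne : ¬ (n == 0) = true := by simp; omega
    rw [if_neg hne]
    have hn1 : 1 ≤ n.toNat := by omega
    congr 1
    apply isqrtLoop_eq n.toNat hn1
    · exact Nat.sqrt_le_self _
    · -- sqrt n ≤ (n+1)/2
      have hs1 : 1 ≤ Nat.sqrt n.toNat := by
        rw [Nat.le_sqrt]; omega
      have hsq : Nat.sqrt n.toNat * Nat.sqrt n.toNat ≤ n.toNat := by
        have h := Nat.sqrt_le' n.toNat; simpa [pow_two] using h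
      rw [Nat.le_div_iff_mul_le (by norm_num)]
      nlinarith
    · intro hle
      have : n.toNat ≤ 1 := by
        have := (Nat.le_div_iff_mul_le (k := 2) (by norm_num)).mp hle
        omega
      interval_cases h : n.toNat <;> simp_all

lemma isqrtB_bounds (d : Int) (hd : 0 ≤ d) :
    0 ≤ isqrtB d ∧ isqrtB d * isqrtB d ≤ d ∧ d < (isqrtB d + 1) * (isqrtB d + 1) := by
  rw [isqrtB_eq d hd]
  have h1 : Nat.sqrt d.toNat * Nat.sqrt d.toNat ≤ d.toNat := by
    have h := Nat.sqrt_le' d.toNat; simpa [pow_two] using h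
  have h2 : d.toNat < (Nat.sqrt d.toNat + 1) * (Nat.sqrt d.toNat + 1) := by
    have h := Nat.lt_succ_sqrt' d.toNat; simpa [pow_two, Nat.succ_eq_add_one] using h
  have h1' : ((Nat.sqrt d.toNat : Int)) * (Nat.sqrt d.toNat : Int) ≤ (d.toNat : Int) := by exact_mod_cast h1
  have h2' : (d.toNat : Int) < ((Nat.sqrt d.toNat : Int) + 1) * ((Nat.sqrt d.toNat : Int) + 1) := by exact_mod_cast h2
  have hdn : (d.toNat : Int) = d := Int.toNat_of_nonneg hd
  refine ⟨by positivity, by omega, by omega⟩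

-- floor-division by two: two-sided bracket
lemma fd2_bounds (a : Int) : 2 * PySem.Int.floordiv a 2 ≤ a ∧ a < 2 * PySem.Int.floordiv a 2 + 2 := by
  have h := (PySem.Int.floordiv_eq_iff_of_pos (a := a) (b := 2) (q := PySem.Int.floordiv a 2) (by norm_num)).mp rfl
  constructor <;> omega

-- the A-loop, from step t on, collects exactly the in-window steps of the range [t, T]
lemma goA_eq (lo hi v0 T : Int)
    (hin : ∀ s : Int, 1 ≤ s → s ≤ T → 2 * lo ≤ s * (2 * v0 - s + 1))
    (hout : (T + 1) * (2 * v0 - (T + 1) + 1) < 2 * lo) :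
    ∀ (n : Nat) (t v pos : Int) (acc : List Int), (T + 1 - t).toNat = n → 1 ≤ t → t ≤ T + 1 →
      v = v0 - (t - 1) → 2 * pos = (t - 1) * (2 * v0 - (t - 1) + 1) →
      goA lo hi v pos t acc =
        acc ++ (PySem.List.pyRange t (T + 1) 1).filter (fun u => decide (u * (2 * v0 - u + 1) ≤ 2 * hi)) := by
  intro n
  induction n with
  | zero =>
    intro t v pos acc hn ht1 htT hv hpos
    have ht : t = T + 1 := by omega
    subst ht
    have h2pos' : 2 * (pos + v) = (T + 1) * (2 * v0 - (T + 1) + 1) := by linear_combination hpos + 2 * hv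
    rw [goA]
    have hc1 : ¬ (lo ≤ pos + v ∧ pos + v ≤ hi) := by
      rintro ⟨h, -⟩; omega
    have hc2 : pos + v < lo := by omega
    simp only [hc1, if_false, hc2, if_true, PySem.List.pyRange_one_eq_nil (le_refl (T + 1))]
    simp
  | succ m ih =>
    intro t v pos acc hn ht1 htT hv hpos
    have htT' : t ≤ T := by omega
    have h2pos' : 2 * (pos + v) = t * (2 * v0 - t + 1) := by linear_combination hpos + 2 * hv
    have hge : 2 * lo ≤ t * (2 * v0 - t + 1) := hin t ht1 htT'
    rw [goA]
    have hc2 : ¬ (pos + v < lo) := by omega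
    rw [PySem.List.pyRange_one_cons (by omega : t < T + 1)]
    have hrec := ih (t + 1) (v - 1) (pos + v) (if lo ≤ pos + v ∧ pos + v ≤ hi then acc ++ [t] else acc)
      (by omega) (by omega) (by omega) (by omega)
      (by linear_combination h2pos')
    simp only [hc2, if_false]
    rw [hrec]
    by_cases hQ : t * (2 * v0 - t + 1) ≤ 2 * hi
    · have hc1 : (lo ≤ pos + v ∧ pos + v ≤ hi) := ⟨by omega, by omega⟩
      simp only [hc1, if_true, List.filter_cons, decide_eq_true hQ]
      simp
    · have hc1 : ¬ (lo ≤ pos + v ∧ pos + v ≤ hi) := by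
        rintro ⟨-, h⟩; omega
      simp only [hc1, if_false, List.filter_cons]
      have : decide (t * (2 * v0 - t + 1) ≤ 2 * hi) = false := by simpa using hQ
      simp [this]

-- a filter of a contiguous range by "≤ t1 or ≥ t2" is two contiguous ranges
lemma filter_range_eq (T t1 t2 : Int) (p : Int → Prop) [DecidablePred p] (h12 : t1 < t2)
    (hiff : ∀ u, 1 ≤ u → u ≤ T → (p u ↔ (u ≤ t1 ∨ t2 ≤ u))) :
    (PySem.List.pyRange 1 (T + 1) 1).filter (fun u => decide (p u)) =
      PySem.List.pyRange 1 (min t1 T + 1) 1 ++ PySem.List.pyRange (max t2 1) (T + 1) 1 := by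
  have hpwL : ((PySem.List.pyRange 1 (T + 1) 1).filter (fun u => decide (p u))).Pairwise (· < ·) :=
    (PySem.List.pairwise_lt_pyRange_one 1 (T + 1)).filter _
  have hpwR : (PySem.List.pyRange 1 (min t1 T + 1) 1 ++ PySem.List.pyRange (max t2 1) (T + 1) 1).Pairwise (· < ·) := by
    rw [List.pairwise_append]
    refine ⟨PySem.List.pairwise_lt_pyRange_one _ _, PySem.List.pairwise_lt_pyRange_one _ _, ?_⟩
    intro x hx y hy
    rw [PySem.List.mem_pyRange_one] at hx hy
    omega
  have hmem : ∀ a, a ∈ (PySem.List.pyRange 1 (T + 1) 1).filter (fun u => decide (p u)) ↔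
      a ∈ PySem.List.pyRange 1 (min t1 T + 1) 1 ++ PySem.List.pyRange (max t2 1) (T + 1) 1 := by
    intro a
    rw [List.mem_filter, List.mem_append, PySem.List.mem_pyRange_one, PySem.List.mem_pyRange_one,
      PySem.List.mem_pyRange_one, decide_eq_true_iff]
    constructor
    · rintro ⟨⟨ha1, ha2⟩, hp⟩
      have := (hiff a ha1 (by omega)).mp hp
      omega
    · intro h
      have hb : 1 ≤ a ∧ a < T + 1 := by omega
      refine ⟨hb, (hiff a hb.1 (by omega)).mpr (by omega)⟩
  have hperm := (List.perm_ext_iff_of_nodup (hpwL.imp ne_of_lt) (hpwR.imp ne_of_lt)).mpr hmem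
  exact List.Perm.eq_of_pairwise (le := (· < ·)) (fun a b _ _ h1 h2 => absurd h2 (asymm h1)) hpwL hpwR hperm

-- main equivalence
theorem main_eq (velocity_y : Int) (range_y : List Int)
    (hPre : Pre_get_possible_move_times velocity_y range_y) :
    get_possible_move_times velocity_y range_y = get_possible_move_times_alt velocity_y range_y := by
  unfold Pre_get_possible_move_times at hPre
  obtain ⟨lo, hi, rest, rfl⟩ : ∃ lo hi rest, range_y = lo :: hi :: rest := by
    match range_y, hPre with
    | (lo :: hi :: rest), _ => exact ⟨lo, hi, rest, rfl⟩
  have hg0 : PySem.List.pyGet? (lo :: hi :: rest) 0 = some lo := PySem.List.pyGet?_zero_cons _ _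
  have hg1 : PySem.List.pyGet? (lo :: hi :: rest) 1 = some hi := by
    have h := PySem.List.pyGet?_cons_succ (x := lo) (xs := hi :: rest) (n := 0)
    simpa using h
  unfold get_possible_move_times get_possible_move_times_alt
  rw [hg0, hg1]
  simp only []
  by_cases hvlo : velocity_y < lo
  · rw [goA]
    have hc1 : ¬ (lo ≤ 0 + velocity_y ∧ 0 + velocity_y ≤ hi) := by rintro ⟨h, -⟩; omega
    have hc2 : (0 + velocity_y < lo) := by omega
    simp [hc1, hc2, hvlo]
  · simp only [if_neg hvlo]
    set b := 2 * velocity_y + 1 with hb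
    set d1 := b * b - 8 * lo with hd1def
    have hlov : lo ≤ velocity_y := by omega
    have hd1 : 0 ≤ d1 := by
      have hid : d1 = (2 * velocity_y - 1) * (2 * velocity_y - 1) + 8 * (velocity_y - lo) := by
        rw [hd1def, hb]; ring
      have hnn := mul_self_nonneg (2 * velocity_y - 1)
      omega
    obtain ⟨hs0, hs1, hs2⟩ := isqrtB_bounds d1 hd1
    set s1 := isqrtB d1 with hs1def
    set T := PySem.Int.floordiv (b + s1) 2 with hTdef
    obtain ⟨hT1, hT2⟩ := fd2_bounds (b + s1)
    have hq1 : (2 * velocity_y - 1) * (2 * velocity_y - 1) ≤ d1 := by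
      have hid : d1 = (2 * velocity_y - 1) * (2 * velocity_y - 1) + 8 * (velocity_y - lo) := by
        rw [hd1def, hb]; ring
      omega
    -- s1 ≥ |2*velocity_y - 1|
    have habs1 : 2 * velocity_y - 1 ≤ s1 := by
      by_contra hcon
      have hm : (s1 + 1) * (s1 + 1) ≤ (2 * velocity_y - 1) * (2 * velocity_y - 1) :=
        mul_le_mul (by omega) (by omega) (by omega) (by omega)
      omega
    have habs2 : 1 - 2 * velocity_y ≤ s1 := by
      by_contra hcon
      have hid : (1 - 2 * velocity_y) * (1 - 2 * velocity_y) = (2 * velocity_y - 1) * (2 * velocity_y - 1) := by ring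
      have hm : (s1 + 1) * (s1 + 1) ≤ (1 - 2 * velocity_y) * (1 - 2 * velocity_y) :=
        mul_le_mul (by omega) (by omega) (by omega) (by omega)
      omega
    have hTpos : 1 ≤ T := by omega
    have hin : ∀ s : Int, 1 ≤ s → s ≤ T → 2 * lo ≤ s * (2 * velocity_y - s + 1) := by
      intro s hs1' hsT
      have h1 : b - 2 * s ≤ s1 := by omega
      have h2 : 2 * s - b ≤ s1 := by omega
      have hprod : 0 ≤ (s1 - (b - 2 * s)) * (s1 + (b - 2 * s)) := mul_nonneg (by omega) (by omega)
      have hexp : (s1 - (b - 2 * s)) * (s1 + (b - 2 * s)) = s1 * s1 - (b - 2 * s) * (b - 2 * s) := by ring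
      have hQ : 4 * (s * (2 * velocity_y - s + 1)) = b * b - (b - 2 * s) * (b - 2 * s) := by
        rw [hb]; ring
      omega
    have hout : (T + 1) * (2 * velocity_y - (T + 1) + 1) < 2 * lo := by
      have h1 : s1 + 1 ≤ 2 * (T + 1) - b := by omega
      have hm : (s1 + 1) * (s1 + 1) ≤ (2 * (T + 1) - b) * (2 * (T + 1) - b) :=
        mul_le_mul h1 h1 (by omega) (by omega)
      have hQ : 4 * ((T + 1) * (2 * velocity_y - (T + 1) + 1)) = b * b - (2 * (T + 1) - b) * (2 * (T + 1) - b) := by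
        rw [hb]; ring
      omega
    have hA := goA_eq lo hi velocity_y T hin hout T.toNat 1 velocity_y 0 []
      (by omega) (by omega) (by omega) (by ring) (by ring)
    rw [hA]
    simp only [List.nil_append]
    set d2 := b * b - 8 * hi with hd2def
    by_cases hd2 : d2 ≤ 0
    · rw [if_pos hd2]
      apply List.filter_eq_self.mpr
      intro x hx
      rw [decide_eq_true_iff]
      have hQ : 4 * (x * (2 * velocity_y - x + 1)) = b * b - (b - 2 * x) * (b - 2 * x) := by
        rw [hb]; ring
      have hnn := mul_self_nonneg (b - 2 * x)
      omega
    · rw [if_neg hd2]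
      obtain ⟨hc0, hcl, hcu⟩ := isqrtB_bounds (d2 - 1) (by omega)
      set c2 := isqrtB (d2 - 1) + 1 with hc2def
      have he : c2 - 1 = isqrtB (d2 - 1) := by omega
      have hcd1 : (c2 - 1) * (c2 - 1) ≤ d2 - 1 := by rw [he]; exact hcl
      have hcd2 : d2 - 1 < c2 * c2 := hcu
      have hcpos : 1 ≤ c2 := by omega
      obtain ⟨ht1a, ht1b⟩ := fd2_bounds (b - c2)
      obtain ⟨ht2a, ht2b⟩ := fd2_bounds (b + c2 + 1)
      set t1 := PySem.Int.floordiv (b - c2) 2 with ht1def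
      set t2 := PySem.Int.floordiv (b + c2 + 1) 2 with ht2def
      apply filter_range_eq T t1 t2 (fun u => u * (2 * velocity_y - u + 1) ≤ 2 * hi) (by omega)
      intro u hu1 huT
      have hQ : 4 * (u * (2 * velocity_y - u + 1)) = b * b - (b - 2 * u) * (b - 2 * u) := by
        rw [hb]; ring
      constructor
      · intro hp
        by_contra hmid
        push_neg at hmid
        obtain ⟨hm1, hm2⟩ := hmid
        have hb1 : 0 ≤ c2 - 1 - (b - 2 * u) := by omega
        have hb2 : 0 ≤ c2 - 1 + (b - 2 * u) := by omega
        have hprod : 0 ≤ (c2 - 1 - (b - 2 * u)) * (c2 - 1 + (b - 2 * u)) := mul_nonneg hb1 hb2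
        have hexp : (c2 - 1 - (b - 2 * u)) * (c2 - 1 + (b - 2 * u)) = (c2 - 1) * (c2 - 1) - (b - 2 * u) * (b - 2 * u) := by ring
        omega
      · intro h
        rcases h with h | h
        · have hcb : c2 ≤ b - 2 * u := by omega
          have hm : c2 * c2 ≤ (b - 2 * u) * (b - 2 * u) := mul_le_mul hcb hcb (by omega) (by omega)
          omega
        · have hcb : c2 ≤ 2 * u - b := by omega
          have hm : c2 * c2 ≤ (2 * u - b) * (2 * u - b) := mul_le_mul hcb hcb (by omega) (by omega)
          have hid : (2 * u - b) * (2 * u - b) = (b - 2 * u) * (b - 2 * u) := by ring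
          omega

-- ===== VERDICT (by name: the statement is the Claim_ definition above) =====
theorem get_possible_move_times_spec : Claim_equal_get_possible_move_times := by
  intro velocity_y range_y _ hPre
  exact main_eq velocity_y range_y hPre
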